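-- pv_equiv track=rewrite | github.com/bluetifulc/baekjoon | Programmers/algorithm/150369.py | solution
-- ===== SOURCE A (Python) =====
-- def solution(cap, n, deliveries, pickups):
--     answer = 0
--
--     cur_d = 0
--     cur_p = 0
--
--     for i in range(n-1, -1, -1):
--         time = 0
--
--         cur_d -= deliveries[i]
--         cur_p -= pickups[i]
--
--         while cur_d < 0 or cur_p < 0:
--             cur_d += cap
--             cur_p += cap
--             time += 1
--
--         answer += time * (i+1) * 2
--
--     return answer
-- ===== SOURCE B (Python) =====
-- def solution(cap, n, deliveries, pickups):
--     # stage 1: scanning from the last house, record per-house minimal trip counts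
--     # (ceiling divisions of the suffix sums by cap)
--     reqs = []
--     sd = 0
--     sp = 0
--     for i in range(n - 1, -1, -1):
--         sd += deliveries[i]
--         sp += pickups[i]
--         reqs.append(max(0, -(-sd // cap), -(-sp // cap)))
--     # stage 2: running maxima of those counts, summed (telescoped form of the answer)
--     total = 0
--     run = 0
--     for r in reqs:
--         run = max(run, r)
--         total += run
--     return 2 * total
-- ===== Notes on version B (the rewrite author's own statement) =====
-- stated objective: alternative
-- what changed: A's single backward loop with an inner while that counts trips one cap at a time is replaced by two staged passes: a first pass builds the list of per-house trip requirements as ceiling divisions of suffix sums by cap, and a second pass sums their running maxima using the telescoped identity answer = 2 * sum of running maxima, so there is no inner loop and no (i+1)-weighted differences (worst-case asymptotics improve, but on typical inputs the inner loop is short and measured time is similar).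
-- outside the precondition, e.g. on solution(0, 1, [0], [0]): A returns 0, B raises ZeroDivisionError; on solution(-3, 1, [-5], [0]): A returns 0, B returns 4
import Mathlib
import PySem

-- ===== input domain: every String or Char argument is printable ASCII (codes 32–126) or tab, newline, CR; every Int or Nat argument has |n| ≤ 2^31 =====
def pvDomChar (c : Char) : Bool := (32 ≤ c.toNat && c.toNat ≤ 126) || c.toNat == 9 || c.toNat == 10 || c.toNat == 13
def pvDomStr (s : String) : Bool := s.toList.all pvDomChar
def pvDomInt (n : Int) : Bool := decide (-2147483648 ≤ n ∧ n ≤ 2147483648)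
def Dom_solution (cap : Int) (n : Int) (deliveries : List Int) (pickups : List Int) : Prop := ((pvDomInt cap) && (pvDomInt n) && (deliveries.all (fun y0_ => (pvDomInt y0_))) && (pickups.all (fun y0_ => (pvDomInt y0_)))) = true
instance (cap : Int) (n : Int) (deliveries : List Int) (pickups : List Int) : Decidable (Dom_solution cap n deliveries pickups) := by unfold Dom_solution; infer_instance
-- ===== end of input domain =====

-- B replaces A's fused backward loop with inner cap-by-cap counting by two staged passes:
-- first the per-house ceiling-division trip requirements, then a running-maximum sum in the
-- telescoped form 'answer = 2 * sum of running maxima' (objective: alternative).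

-- ===== PORT A =====
-- the inner `while cur_d < 0 or cur_p < 0` loop; fuel only makes the recursion total —
-- under Pre_ (0 < cap) the supplied fuel is enough and the loop exits exactly as in Python
def solWhile (cap : Int) : Nat → Int × Int × Int → Int × Int × Int
  | 0, s => s
  | fuel + 1, s =>
      if s.1 < 0 ∨ s.2.1 < 0 then solWhile cap fuel (s.1 + cap, s.2.1 + cap, s.2.2 + 1) else s

-- one iteration of A's `for i in range(n-1, -1, -1)` body; state (answer, cur_d, cur_p)
def solStepA (cap : Int) (deliveries pickups : List Int) (s : Int × Int × Int) (i : Int) :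
    Int × Int × Int :=
  let d := s.2.1 - PySem.List.pyGetD deliveries i 0
  let p := s.2.2 - PySem.List.pyGetD pickups i 0
  let r := solWhile cap (d.natAbs + p.natAbs) (d, p, 0)
  (s.1 + r.2.2 * (i + 1) * 2, r.1, r.2.1)

def solution (cap : Int) (n : Int) (deliveries : List Int) (pickups : List Int) : Int :=
  ((PySem.List.pyRange (n - 1) (-1) (-1)).foldl (solStepA cap deliveries pickups) (0, 0, 0)).1

-- ===== PORT B =====
-- ceiling division -(-a // cap), as written in Source B
def cdivB (cap a : Int) : Int := -(PySem.Int.floordiv (-a) cap)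

-- stage 1 body: suffix sums and the appended per-house requirement; state (sd, sp, reqs)
def solStage1 (cap : Int) (deliveries pickups : List Int) (s : Int × Int × List Int) (i : Int) :
    Int × Int × List Int :=
  let sd := s.1 + PySem.List.pyGetD deliveries i 0
  let sp := s.2.1 + PySem.List.pyGetD pickups i 0
  (sd, sp, s.2.2 ++ [max 0 (max (cdivB cap sd) (cdivB cap sp))])

-- stage 2 body: running maximum, summed; state (total, run)
def solStage2 (s : Int × Int) (r : Int) : Int × Int :=
  (s.1 + max s.2 r, max s.2 r)

def solution_alt (cap : Int) (n : Int) (deliveries : List Int) (pickups : List Int) : Int :=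
  let reqs :=
    ((PySem.List.pyRange (n - 1) (-1) (-1)).foldl (solStage1 cap deliveries pickups)
      (0, 0, [])).2.2
  2 * (reqs.foldl solStage2 (0, 0)).1

-- ===== PRECONDITION & SPEC =====
-- Pre_ excludes cap ≤ 0, where A diverges as soon as any deficit appears (and where on the few
-- inputs with no deficit A still returns 0, B's ceiling division raises for cap = 0 or can
-- return a different value for cap < 0), and n beyond a list's length, where A raises IndexError.
def Pre_solution (cap : Int) (n : Int) (deliveries : List Int) (pickups : List Int) : Prop :=
  0 < cap ∧ n ≤ (deliveries.length : Int) ∧ n ≤ (pickups.length : Int)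
instance (cap : Int) (n : Int) (deliveries : List Int) (pickups : List Int) : Decidable (Pre_solution cap n deliveries pickups) := by unfold Pre_solution; infer_instance
def pvWitness_solution : Int × Int × List Int × List Int := (4, 2, [1, 0], [0, 3])
def Spec_solution (cap : Int) (n : Int) (deliveries : List Int) (pickups : List Int) (out : Int) : Prop := out = solution_alt cap n deliveries pickups
instance (cap : Int) (n : Int) (deliveries : List Int) (pickups : List Int) (out : Int) : Decidable (Spec_solution cap n deliveries pickups out) := by unfold Spec_solution; infer_instance

-- ===== CLAIM (what is proved, stated in full; the proofs are below) =====
def Claim_equal_solution : Prop := ∀ (cap : Int) (n : Int) (deliveries : List Int) (pickups : List Int), Dom_solution cap n deliveries pickups → Pre_solution cap n deliveries pickups → Spec_solution cap n deliveries pickups (solution cap n deliveries pickups)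

-- ===== LEMMAS AND PROOFS =====

-- proof-only fused form of B: one backward pass, state (answer, sd, sp, trips)
def fusedStep (cap : Int) (deliveries pickups : List Int) (s : Int × Int × Int × Int) (i : Int) :
    Int × Int × Int × Int :=
  let sd := s.2.1 + PySem.List.pyGetD deliveries i 0
  let sp := s.2.2.1 + PySem.List.pyGetD pickups i 0
  let need := max s.2.2.2 (max (cdivB cap sd) (cdivB cap sp))
  (s.1 + (need - s.2.2.2) * (i + 1) * 2, sd, sp, need)

theorem cdivB_bounds (cap a : Int) (hc : 0 < cap) :
    (cdivB cap a - 1) * cap < a ∧ a ≤ cdivB cap a * cap :=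
  (PySem.Int.neg_floordiv_neg_eq_iff_of_pos hc).mp rfl

theorem cdivB_shift (cap a T : Int) (hc : 0 < cap) :
    cdivB cap (a - T * cap) = cdivB cap a - T := by
  have h := cdivB_bounds cap a hc
  refine (PySem.Int.neg_floordiv_neg_eq_iff_of_pos hc).mpr ⟨?_, ?_⟩ <;> nlinarith [h.1, h.2]

theorem cdivB_nonpos (cap a : Int) (hc : 0 < cap) (ha : a ≤ 0) : cdivB cap a ≤ 0 := by
  have h := (cdivB_bounds cap a hc).1
  nlinarith

theorem cdivB_pos (cap a : Int) (hc : 0 < cap) (ha : 0 < a) : 1 ≤ cdivB cap a := by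
  have h := (cdivB_bounds cap a hc).2
  nlinarith

-- the number of iterations A's while-loop performs from state (d, p)
def Kof (cap d p : Int) : Int := max 0 (max (cdivB cap (-d)) (cdivB cap (-p)))

theorem Kof_nonneg (cap d p : Int) : 0 ≤ Kof cap d p := le_max_left _ _

theorem solWhile_spec (cap : Int) (hc : 0 < cap) :
    ∀ (fuel : Nat) (d p t : Int), Kof cap d p ≤ (fuel : Int) →
      solWhile cap fuel (d, p, t) =
        (d + Kof cap d p * cap, p + Kof cap d p * cap, t + Kof cap d p) := by
  intro fuel
  induction fuel with
  | zero =>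
      intro d p t hf
      have h0 := Kof_nonneg cap d p
      have : Kof cap d p = 0 := le_antisymm (by exact_mod_cast hf) h0
      simp [solWhile, this]
  | succ fuel ih =>
      intro d p t hf
      by_cases h : d < 0 ∨ p < 0
      · have h1 : 1 ≤ Kof cap d p := by
          rcases h with h | h
          · have := cdivB_pos cap (-d) hc (by omega)
            unfold Kof; omega
          · have := cdivB_pos cap (-p) hc (by omega)
            unfold Kof; omega
        have e1 : cdivB cap (-(d + cap)) = cdivB cap (-d) - 1 := by
          have := cdivB_shift cap (-d) 1 hc
          rw [show -(d + cap) = -d - 1 * cap by ring]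
          exact this
        have e2 : cdivB cap (-(p + cap)) = cdivB cap (-p) - 1 := by
          have := cdivB_shift cap (-p) 1 hc
          rw [show -(p + cap) = -p - 1 * cap by ring]
          exact this
        have hK' : Kof cap (d + cap) (p + cap) = Kof cap d p - 1 := by
          unfold Kof at *; omega
        have hstep : solWhile cap (fuel + 1) (d, p, t) =
            solWhile cap fuel (d + cap, p + cap, t + 1) := by
          simp [solWhile, h]
        rw [hstep, ih (d + cap) (p + cap) (t + 1) (by push_cast at hf ⊢; omega), hK']
        simp only [Prod.mk.injEq]
        refine ⟨by ring, by ring, by ring⟩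
      · push Not at h
        have hK0 : Kof cap d p = 0 := by
          have h1 := cdivB_nonpos cap (-d) hc (by omega)
          have h2 := cdivB_nonpos cap (-p) hc (by omega)
          unfold Kof; omega
        have : ¬ (d < 0 ∨ p < 0) := by omega
        simp [solWhile, this, hK0]

theorem Kof_le_fuel (cap d p : Int) (hc : 0 < cap) :
    Kof cap d p ≤ ((d.natAbs + p.natAbs : Nat) : Int) := by
  have hd := (cdivB_bounds cap (-d) hc).1
  have hp := (cdivB_bounds cap (-p) hc).1
  have hd' : cdivB cap (-d) ≤ 0 ∨ cdivB cap (-d) - 1 < -d := by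
    by_cases h1 : 1 ≤ cdivB cap (-d)
    · right
      have : cdivB cap (-d) - 1 ≤ (cdivB cap (-d) - 1) * cap := by nlinarith
      omega
    · left; omega
  have hp' : cdivB cap (-p) ≤ 0 ∨ cdivB cap (-p) - 1 < -p := by
    by_cases h1 : 1 ≤ cdivB cap (-p)
    · right
      have : cdivB cap (-p) - 1 ≤ (cdivB cap (-p) - 1) * cap := by nlinarith
      omega
    · left; omega
  unfold Kof; omega

-- A's state (ans, d, p) and the fused state (ans, sd, sp, T) stay linked by
-- d = T*cap - sd, p = T*cap - sp with d, p ≥ 0, and produce the same answer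
theorem fold_eq (cap : Int) (hc : 0 < cap) (deliveries pickups : List Int) :
    ∀ (l : List Int) (ans d p sd sp T : Int), 0 ≤ d → 0 ≤ p →
      d = T * cap - sd → p = T * cap - sp →
      (l.foldl (solStepA cap deliveries pickups) (ans, d, p)).1 =
        (l.foldl (fusedStep cap deliveries pickups) (ans, sd, sp, T)).1 := by
  intro l
  induction l with
  | nil => intro ans d p sd sp T _ _ _ _; rfl
  | cons i l ih =>
      intro ans d p sd sp T hd0 hp0 hd hp
      simp only [List.foldl_cons, solStepA, fusedStep]
      set x := PySem.List.pyGetD deliveries i 0 with hx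
      set y := PySem.List.pyGetD pickups i 0 with hy
      have hfuel : Kof cap (d - x) (p - y) ≤ (((d - x).natAbs + (p - y).natAbs : Nat) : Int) :=
        Kof_le_fuel cap (d - x) (p - y) hc
      rw [solWhile_spec cap hc _ (d - x) (p - y) 0 hfuel]
      set u := cdivB cap (sd + x) with hu
      set v := cdivB cap (sp + y) with hv
      have eu : cdivB cap (-(d - x)) = u - T := by
        have := cdivB_shift cap (sd + x) T hc
        rw [show -(d - x) = (sd + x) - T * cap by rw [hd]; ring]
        exact this
      have ev : cdivB cap (-(p - y)) = v - T := by
        have := cdivB_shift cap (sp + y) T hc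
        rw [show -(p - y) = (sp + y) - T * cap by rw [hp]; ring]
        exact this
      have hKT : Kof cap (d - x) (p - y) = max T (max u v) - T := by
        unfold Kof; omega
      set need := max T (max u v) with hneed
      have hd' : d - x + (need - T) * cap = need * cap - (sd + x) := by
        rw [hd]; ring
      have hp' : p - y + (need - T) * cap = need * cap - (sp + y) := by
        rw [hp]; ring
      have hdn : 0 ≤ d - x + (need - T) * cap := by
        rw [hd']
        have h1 : u ≤ need := le_trans (le_max_left _ _) (le_max_right _ _)
        have h2 : sd + x ≤ u * cap := (cdivB_bounds cap (sd + x) hc).2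
        nlinarith
      have hpn : 0 ≤ p - y + (need - T) * cap := by
        rw [hp']
        have h1 : v ≤ need := le_trans (le_max_right _ _) (le_max_right _ _)
        have h2 : sp + y ≤ v * cap := (cdivB_bounds cap (sp + y) hc).2
        nlinarith
      have := ih (ans + (need - T) * (i + 1) * 2) (d - x + (need - T) * cap)
        (p - y + (need - T) * cap) (sd + x) (sp + y) need hdn hpn hd' hp'
      simpa [hKT, zero_add] using this

-- stage 1's list accumulator only ever grows on the right
theorem stage1_acc (cap : Int) (deliveries pickups : List Int) :
    ∀ (l : List Int) (sd sp : Int) (rs : List Int),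
      l.foldl (solStage1 cap deliveries pickups) (sd, sp, rs) =
        ((l.foldl (solStage1 cap deliveries pickups) (sd, sp, [])).1,
         (l.foldl (solStage1 cap deliveries pickups) (sd, sp, [])).2.1,
         rs ++ (l.foldl (solStage1 cap deliveries pickups) (sd, sp, [])).2.2) := by
  intro l
  induction l with
  | nil => intro sd sp rs; simp
  | cons i l ih =>
      intro sd sp rs
      simp only [List.foldl_cons, solStage1, List.nil_append]
      rw [ih _ _ (rs ++ _), ih _ _ ([_])]
      simp

-- telescoping: the fused answer over range(k-1, -1, -1) equals the two-stage form
theorem tele (cap : Int) (deliveries pickups : List Int) :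
    ∀ (k : Nat) (ans sd sp T tot : Int), 0 ≤ T →
      ((PySem.List.pyRange ((k : Int) - 1) (-1) (-1)).foldl
          (fusedStep cap deliveries pickups) (ans, sd, sp, T)).1 =
        ans +
          2 * ((((PySem.List.pyRange ((k : Int) - 1) (-1) (-1)).foldl
                  (solStage1 cap deliveries pickups) (sd, sp, [])).2.2).foldl
                solStage2 (tot, T)).1 - 2 * tot - 2 * T * k := by
  intro k
  induction k with
  | zero =>
      intro ans sd sp T tot hT
      rw [PySem.List.pyRange_neg_one_eq_nil (by norm_num)]
      simp
  | succ k ih =>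
      intro ans sd sp T tot hT
      have hcons : PySem.List.pyRange (((k : Nat) + 1 : Int) - 1) (-1) (-1) =
          (k : Int) :: PySem.List.pyRange ((k : Int) - 1) (-1) (-1) := by
        rw [show (((k : Nat) + 1 : Int) - 1) = (k : Int) by ring]
        exact PySem.List.pyRange_neg_one_cons (by omega)
      push_cast
      rw [show ((k : Int) + 1 - 1) = (((k : Nat) + 1 : Int) - 1) by ring, hcons]
      simp only [List.foldl_cons, fusedStep, solStage1, List.nil_append]
      set sd' := sd + PySem.List.pyGetD deliveries (k : Int) 0 with hsd'
      set sp' := sp + PySem.List.pyGetD pickups (k : Int) 0 with hsp'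
      set u := cdivB cap sd' with hu
      set v := cdivB cap sp' with hv
      set need := max T (max u v) with hneed
      have hneed0 : 0 ≤ need := le_trans hT (le_max_left _ _)
      rw [stage1_acc cap deliveries pickups _ sd' sp' [max 0 (max u v)]]
      set reqs := ((PySem.List.pyRange ((k : Int) - 1) (-1) (-1)).foldl
          (solStage1 cap deliveries pickups) (sd', sp', [])).2.2 with hreqs
      simp only [List.cons_append, List.nil_append, List.foldl_cons, solStage2]
      rw [ih (ans + (need - T) * ((k : Int) + 1) * 2) sd' sp' need (tot + need) hneed0,
        ← hreqs]
      have hrun : max T (max 0 (max u v)) = need := by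
        rw [max_comm (0 : Int) (max u v), ← max_assoc]
        exact max_eq_left hneed0
      rw [hrun]
      ring
  
-- ===== VERDICT (by name: the statement is the Claim_ definition above) =====
theorem solution_spec : Claim_equal_solution := by
  intro cap n deliveries pickups _ hpre
  unfold Spec_solution solution solution_alt
  by_cases hn : n ≤ 0
  · rw [PySem.List.pyRange_neg_one_eq_nil (by omega)]
    simp
  · have hk : n - 1 = ((n.toNat : Int)) - 1 := by omega
    rw [hk, fold_eq cap hpre.1 deliveries pickups _ 0 0 0 0 0 0 le_rfl le_rfl (by ring)
        (by ring), tele cap deliveries pickups n.toNat 0 0 0 0 0 le_rfl]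
    ring
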